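-- pv_equiv track=rewrite | github.com/Kram037/Companion_App | risorse/talenti/parse_feats.py | split_into_feat_blocks
-- ===== SOURCE A (Python) =====
-- SOURCES = {
--     "PHB":  ("Player",       "Handbook",  "Player's Handbook"),
--     "XGtE": ("Xanathar",     "Everything", "Xanathar's Guide to Everything"),
--     "TCoE": ("Tasha",        "Everything", "Tasha's Cauldron of Everything"),
--     "MToF": ("Mordenkainen", "Foes",      "Mordenkainen's Tome of Foes"),
--     "ERLW": ("Eberron",      "Wildemount","Eberron: Rising from the Last War"),
--     "FToD": ("Fizban",       "Dragons",   "Fizban's Treasury of Dragons"),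
--     # Nel PDF aidedd la fonte appare come "Glory of the Giants" (non "Bigby Presents: ...").
--     "BGG":  ("Glory",        "Giants",    "Bigby Presents: Glory of the Giants"),
--     "SCAG": ("Sword Coast",  "Adventurer","Sword Coast Adventurer's Guide"),
--     "SCC":  ("Strixhaven",   "Curriculum","Strixhaven: A Curriculum of Chaos"),
-- }
--
-- def detect_source(line: str) -> str | None:
--     """Dato un testo, restituisce lo slug fonte se la riga matcha un libro."""
--     s = line.strip()
--     for slug, (a, b, _full) in SOURCES.items():
--         if a in s and b in s:
--             return slug
--     return None
--
-- def split_into_feat_blocks(full_text: str) -> list[list[str]]: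
--     """Divide il testo in blocchi-talento. Ogni blocco termina con una riga
--     di fonte riconosciuta; il successivo inizia dalla riga successiva."""
--     lines = full_text.splitlines()
--     blocks = []
--     cur = []
--     # La prima riga del PDF e' "DnD 5 Feats" (titolo): saltala.
--     if lines and lines[0].strip().lower().startswith("dnd"):
--         lines = lines[1:]
--     for line in lines:
--         if not line.strip():
--             continue
--         cur.append(line)
--         if detect_source(line):
--             blocks.append(cur)
--             cur = []
--     if cur:
--         # Eventuale residuo (di solito solo footer gia' filtrato).
--         blocks.append(cur)
--     return blocks
-- ===== SOURCE B (Python) =====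
-- SOURCES = {
--     "PHB":  ("Player",       "Handbook",  "Player's Handbook"),
--     "XGtE": ("Xanathar",     "Everything", "Xanathar's Guide to Everything"),
--     "TCoE": ("Tasha",        "Everything", "Tasha's Cauldron of Everything"),
--     "MToF": ("Mordenkainen", "Foes",      "Mordenkainen's Tome of Foes"),
--     "ERLW": ("Eberron",      "Wildemount","Eberron: Rising from the Last War"),
--     "FToD": ("Fizban",       "Dragons",   "Fizban's Treasury of Dragons"),
--     "BGG":  ("Glory",        "Giants",    "Bigby Presents: Glory of the Giants"),
--     "SCAG": ("Sword Coast",  "Adventurer","Sword Coast Adventurer's Guide"),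
--     "SCC":  ("Strixhaven",   "Curriculum","Strixhaven: A Curriculum of Chaos"),
-- }
--
-- def detect_source(line: str) -> str | None:
--     s = line.strip()
--     for slug, (a, b, _full) in SOURCES.items():
--         if a in s and b in s:
--             return slug
--     return None
--
-- def split_into_feat_blocks(full_text: str) -> list[list[str]]:
--     """Backward pass: walk the lines bottom-up, starting a fresh block at each
--     recognised source line and attaching every other non-empty line to the
--     block most recently opened below it (or to the residual tail)."""
--     lines = full_text.splitlines()
--     if lines and lines[0].strip().lower().startswith("dnd"):
--         lines = lines[1:]
--     rev = []  # blocks in reverse order, each block's lines in reverse order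
--     for line in reversed(lines):
--         if not line.strip():
--             continue
--         if detect_source(line):
--             rev.append([line])
--         elif rev:
--             rev[-1].append(line)
--         else:
--             rev.append([line])
--     return [list(reversed(b)) for b in reversed(rev)]
-- ===== Notes on version B (the rewrite author's own statement) =====
-- stated objective: alternative
-- what changed: Replaces A's forward loop with a running current-block accumulator (flushed into the block list at each source line and once at the end) by a single backward pass that opens a block at each source line and attaches every other non-empty line to the block most recently opened below it, reversing at the end.
import Mathlib
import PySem

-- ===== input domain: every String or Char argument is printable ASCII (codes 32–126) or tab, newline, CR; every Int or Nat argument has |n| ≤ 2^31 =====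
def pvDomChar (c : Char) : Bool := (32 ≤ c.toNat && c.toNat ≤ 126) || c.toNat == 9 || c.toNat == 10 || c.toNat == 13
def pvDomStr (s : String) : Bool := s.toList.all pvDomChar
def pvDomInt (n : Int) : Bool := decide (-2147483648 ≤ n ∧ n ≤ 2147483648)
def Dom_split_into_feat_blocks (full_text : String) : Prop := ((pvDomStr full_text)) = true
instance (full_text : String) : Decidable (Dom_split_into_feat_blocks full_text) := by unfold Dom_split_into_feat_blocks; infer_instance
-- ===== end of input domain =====

-- B replaces A's forward accumulator loop by a backward pass that builds the blocks
-- back-to-front; same O(n) cost, objective: alternative decomposition.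

-- ===== PORT A =====
def pvSOURCES : List (String × String × String × String) :=
  [("PHB",  "Player",       "Handbook",   "Player's Handbook"),
   ("XGtE", "Xanathar",     "Everything", "Xanathar's Guide to Everything"),
   ("TCoE", "Tasha",        "Everything", "Tasha's Cauldron of Everything"),
   ("MToF", "Mordenkainen", "Foes",       "Mordenkainen's Tome of Foes"),
   ("ERLW", "Eberron",      "Wildemount", "Eberron: Rising from the Last War"),
   ("FToD", "Fizban",       "Dragons",    "Fizban's Treasury of Dragons"),
   ("BGG",  "Glory",        "Giants",     "Bigby Presents: Glory of the Giants"),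
   ("SCAG", "Sword Coast",  "Adventurer", "Sword Coast Adventurer's Guide"),
   ("SCC",  "Strixhaven",   "Curriculum", "Strixhaven: A Curriculum of Chaos")]

-- the 'for slug, (a, b, _full) in SOURCES.items()' loop of detect_source
def pvDetectGo (s : String) : List (String × String × String × String) → Option String
  | [] => none
  | (slug, a, b, _) :: rest =>
      if PySem.Str.isIn a s && PySem.Str.isIn b s then some slug else pvDetectGo s rest

def pvDetectSource (line : String) : Option String :=
  pvDetectGo (PySem.Str.strip line) pvSOURCES

-- the body of A's 'for line in lines' loop, state = (blocks, cur)
def pvStepA (st : List (List String) × List String) (line : String) :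
    List (List String) × List String :=
  if PySem.Str.strip line = "" then st
  else
    let cur := st.2 ++ [line]
    if (pvDetectSource line).isSome then (st.1 ++ [cur], []) else (st.1, cur)

def split_into_feat_blocks (full_text : String) : List (List String) :=
  let lines := PySem.Str.splitlines full_text
  let lines2 :=
    match lines with
    | [] => ([] : List String)
    | l0 :: rest =>
        if PySem.Str.startswith (PySem.Str.lower (PySem.Str.strip l0)) "dnd"
        then rest else l0 :: rest
  let st := lines2.foldl pvStepA ([], [])
  if st.2 = [] then st.1 else st.1 ++ [st.2]

-- ===== PORT B =====
-- 'rev[-1].append(line)', with 'rev.append([line])' when rev is empty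
def pvAppendToLast (line : String) : List (List String) → List (List String)
  | [] => [[line]]
  | [b] => [b ++ [line]]
  | b :: b' :: bs => b :: pvAppendToLast line (b' :: bs)

-- the body of B's reversed loop, state = rev (blocks reversed, each block reversed)
def pvStepB (rev : List (List String)) (line : String) : List (List String) :=
  if PySem.Str.strip line = "" then rev
  else if (pvDetectSource line).isSome then rev ++ [[line]]
  else pvAppendToLast line rev

def split_into_feat_blocks_alt (full_text : String) : List (List String) :=
  let lines := PySem.Str.splitlines full_text
  let lines2 :=
    match lines with
    | [] => ([] : List String)
    | l0 :: rest =>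
        if PySem.Str.startswith (PySem.Str.lower (PySem.Str.strip l0)) "dnd"
        then rest else l0 :: rest
  let rev := lines2.reverse.foldl pvStepB []
  rev.reverse.map List.reverse

-- ===== PRECONDITION & SPEC =====
def Spec_split_into_feat_blocks (full_text : String) (out : List (List String)) : Prop := out = split_into_feat_blocks_alt full_text
instance (full_text : String) (out : List (List String)) : Decidable (Spec_split_into_feat_blocks full_text out) := by unfold Spec_split_into_feat_blocks; infer_instance

-- ===== CLAIM (what is proved, stated in full; the proofs are below) =====
def Claim_equal_split_into_feat_blocks : Prop := ∀ (full_text : String), Dom_split_into_feat_blocks full_text → Spec_split_into_feat_blocks full_text (split_into_feat_blocks full_text)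

-- ===== LEMMAS AND PROOFS =====

-- reference recursion: both loops compute this splitting
def pvConsHead (l : String) : List (List String) → List (List String)
  | [] => [[l]]
  | b :: bs => (l :: b) :: bs

def pvSplitR : List String → List (List String)
  | [] => []
  | l :: ls =>
      if PySem.Str.strip l = "" then pvSplitR ls
      else if (pvDetectSource l).isSome then [l] :: pvSplitR ls
      else pvConsHead l (pvSplitR ls)

def pvAttach (cur : List String) : List (List String) → List (List String)
  | [] => if cur = [] then [] else [cur]
  | b :: bs => (cur ++ b) :: bs

def pvUnrev (R : List (List String)) : List (List String) := R.reverse.map List.reverse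

theorem pvAttach_nil (S : List (List String)) : pvAttach [] S = S := by
  cases S <;> simp [pvAttach]

theorem pvAttach_snoc (cur : List String) (l : String) (S : List (List String)) :
    pvAttach (cur ++ [l]) S = pvAttach cur (pvConsHead l S) := by
  cases S <;> simp [pvAttach, pvConsHead]

theorem pvFoldA (ls : List String) :
    ∀ (blocks : List (List String)) (cur : List String),
    (let st := ls.foldl pvStepA (blocks, cur);
     if st.2 = [] then st.1 else st.1 ++ [st.2]) = blocks ++ pvAttach cur (pvSplitR ls) := by
  induction ls with
  | nil =>
      intro blocks cur
      by_cases h : cur = [] <;> simp [pvSplitR, pvAttach, h]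
  | cons l ls ih =>
      intro blocks cur
      simp only [List.foldl_cons, pvStepA, pvSplitR]
      by_cases h1 : PySem.Str.strip l = ""
      · simp [h1, ih blocks cur]
      · by_cases h2 : (pvDetectSource l).isSome
        · simp [h1, h2, ih (blocks ++ [cur ++ [l]]) [], pvAttach]
          cases pvSplitR ls <;> rfl
        · simp [h1, h2, ih blocks (cur ++ [l]), pvAttach_snoc]

theorem pvUnrev_ne_nil (R : List (List String)) (h : R ≠ []) : pvUnrev R ≠ [] := by
  simp [pvUnrev, h]

theorem pvConsHead_append (l : String) (S T : List (List String)) (h : S ≠ []) :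
    pvConsHead l (S ++ T) = pvConsHead l S ++ T := by
  cases S with
  | nil => exact absurd rfl h
  | cons b bs => simp [pvConsHead]

theorem pvUnrev_appendToLast (l : String) (R : List (List String)) :
    pvUnrev (pvAppendToLast l R) = pvConsHead l (pvUnrev R) := by
  induction R with
  | nil => simp [pvAppendToLast, pvUnrev, pvConsHead]
  | cons b bs ih =>
      cases bs with
      | nil => simp [pvAppendToLast, pvUnrev, pvConsHead]
      | cons b' bs' =>
          have hne : pvUnrev (b' :: bs') ≠ [] := pvUnrev_ne_nil _ (by simp)
          have hu : ∀ (x : List String) (R : List (List String)),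
              pvUnrev (x :: R) = pvUnrev R ++ [x.reverse] := by
            intro x R; simp [pvUnrev]
          rw [show pvAppendToLast l (b :: b' :: bs') = b :: pvAppendToLast l (b' :: bs') from rfl,
              hu, hu, ih, pvConsHead_append l _ _ hne]

theorem pvFoldB (ls : List String) :
    pvUnrev (ls.reverse.foldl pvStepB []) = pvSplitR ls := by
  rw [List.foldl_reverse]
  induction ls with
  | nil => simp [pvUnrev, pvSplitR]
  | cons l ls ih =>
      rw [List.foldr_cons]
      generalize List.foldr (fun x y => pvStepB y x) ([] : List (List String)) ls = R at ih ⊢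
      simp only [pvStepB, pvSplitR]
      by_cases h1 : PySem.Str.strip l = ""
      · simp [h1, ih]
      · by_cases h2 : (pvDetectSource l).isSome
        · simp [h1, h2, ← ih, pvUnrev]
        · simp [h1, h2, pvUnrev_appendToLast, ih]

theorem pvMain (ls : List String) :
    (let st := ls.foldl pvStepA ([], []);
     if st.2 = [] then st.1 else st.1 ++ [st.2]) = (ls.reverse.foldl pvStepB []).reverse.map List.reverse := by
  rw [pvFoldA ls [] []]
  rw [show (ls.reverse.foldl pvStepB []).reverse.map List.reverse
        = pvUnrev (ls.reverse.foldl pvStepB []) from rfl, pvFoldB]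
  simp [pvAttach_nil]

-- ===== VERDICT (by name: the statement is the Claim_ definition above) =====
theorem split_into_feat_blocks_spec : Claim_equal_split_into_feat_blocks := by
  intro full_text _
  unfold Spec_split_into_feat_blocks split_into_feat_blocks split_into_feat_blocks_alt
  exact pvMain _
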